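-- pv_equiv track=rewrite | github.com/degull/VETAGENT | models/backbone/volterra.py | _generate_shifts
-- ===== SOURCE A (Python) =====
-- def _generate_shifts(k: int):
--     # generate unique (s1, s2) pairs for lossless quadratic term
--     P = k // 2
--     shifts = []
--     for s1 in range(-P, P + 1):
--         for s2 in range(-P, P + 1):
--             if s1 == 0 and s2 == 0:
--                 continue
--             if (s1, s2) < (0, 0):
--                 continue
--             shifts.append((s1, s2))
--     return shifts
-- ===== SOURCE B (Python) =====
-- def _generate_shifts(k: int):
--     # decode the row-major cell indices strictly after the center cell (0,0)
--     # of the (2P+1) x (2P+1) grid: those indices are exactly the kept pairs, in order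
--     P = max(k // 2, 0)
--     W = 2 * P + 1
--     mid = (W * W) // 2  # row-major index of the center (0,0)
--     return [(m // W - P, m % W - P) for m in range(mid + 1, W * W)]
-- ===== Notes on version B (the rewrite author's own statement) =====
-- stated objective: alternative
-- what changed: B replaces A's nested scan of the full (2P+1)^2 grid with a lexicographic skip filter by a single arithmetic decoding pass: it enumerates the row-major cell indices strictly after the center cell and decodes each index m into (m // W - P, m % W - P), so no pair is ever generated and discarded.
import Mathlib
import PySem

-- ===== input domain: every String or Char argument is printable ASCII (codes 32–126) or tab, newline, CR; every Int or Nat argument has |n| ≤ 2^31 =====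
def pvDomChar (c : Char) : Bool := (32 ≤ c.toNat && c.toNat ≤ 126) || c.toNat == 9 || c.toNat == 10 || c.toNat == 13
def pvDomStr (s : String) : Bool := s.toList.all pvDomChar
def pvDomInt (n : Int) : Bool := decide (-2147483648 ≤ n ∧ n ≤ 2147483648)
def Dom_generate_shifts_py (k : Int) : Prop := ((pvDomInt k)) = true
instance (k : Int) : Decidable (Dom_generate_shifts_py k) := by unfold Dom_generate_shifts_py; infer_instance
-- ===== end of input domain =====

-- B decodes the row-major grid indices strictly after the center cell (0,0) into pairs
-- by division/remainder, instead of scanning the grid with a lexicographic filter (objective: alternative).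


-- ===== PORT A =====
def generate_shifts_py (k : Int) : List (Int × Int) :=
  let P := PySem.Int.floordiv k 2
  (PySem.List.pyRange (-P) (P + 1) 1).foldl (fun shifts s1 =>
    (PySem.List.pyRange (-P) (P + 1) 1).foldl (fun shifts s2 =>
      if s1 = 0 ∧ s2 = 0 then shifts
      else if s1 < 0 ∨ (s1 = 0 ∧ s2 < 0) then shifts   -- Python tuple comparison (s1, s2) < (0, 0)
      else shifts ++ [(s1, s2)]) shifts) []

-- ===== PORT B =====
def generate_shifts_py_alt (k : Int) : List (Int × Int) :=
  let P := max (PySem.Int.floordiv k 2) 0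
  let W := 2 * P + 1
  let mid := PySem.Int.floordiv (W * W) 2   -- row-major index of the center (0,0)
  (PySem.List.pyRange (mid + 1) (W * W) 1).map
    (fun m => (PySem.Int.floordiv m W - P, PySem.Int.mod m W - P))

-- ===== PRECONDITION & SPEC =====
def Spec_generate_shifts_py (k : Int) (out : List (Int × Int)) : Prop := out = generate_shifts_py_alt k
instance (k : Int) (out : List (Int × Int)) : Decidable (Spec_generate_shifts_py k out) := by unfold Spec_generate_shifts_py; infer_instance

-- ===== CLAIM (what is proved, stated in full; the proofs are below) =====
def Claim_equal_generate_shifts_py : Prop := ∀ (k : Int), Dom_generate_shifts_py k → Spec_generate_shifts_py k (generate_shifts_py k)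

-- ===== LEMMAS AND PROOFS =====

-- the canonical half-plane list both programs produce (for P ≥ 0)
def pvHalf (P : Int) : List (Int × Int) :=
  (PySem.List.pyRange 1 (P + 1) 1).map (fun s2 => ((0 : Int), s2))
  ++ (PySem.List.pyRange 1 (P + 1) 1).flatMap (fun s1 =>
       (PySem.List.pyRange (-P) (P + 1) 1).map (fun s2 => (s1, s2)))

-- the nested-if continue body of A's inner loop as a single conditional append
theorem pv_step_eq (s1 s2 : Int) (acc : List (Int × Int)) :
    (if s1 = 0 ∧ s2 = 0 then acc
     else if s1 < 0 ∨ (s1 = 0 ∧ s2 < 0) then acc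
     else acc ++ [(s1, s2)])
  = (if (¬(s1 = 0 ∧ s2 = 0) ∧ ¬(s1 < 0 ∨ (s1 = 0 ∧ s2 < 0))) then acc ++ [(s1, s2)] else acc) := by
  split_ifs <;> tauto

-- A's double loop as a flatMap of filtered rows
theorem pvA_flatMap (P : Int) :
    (PySem.List.pyRange (-P) (P + 1) 1).foldl (fun shifts s1 =>
      (PySem.List.pyRange (-P) (P + 1) 1).foldl (fun shifts s2 =>
        if s1 = 0 ∧ s2 = 0 then shifts
        else if s1 < 0 ∨ (s1 = 0 ∧ s2 < 0) then shifts
        else shifts ++ [(s1, s2)]) shifts) []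
  = (PySem.List.pyRange (-P) (P + 1) 1).flatMap (fun s1 =>
      ((PySem.List.pyRange (-P) (P + 1) 1).filter
        (fun s2 => decide (¬(s1 = 0 ∧ s2 = 0) ∧ ¬(s1 < 0 ∨ (s1 = 0 ∧ s2 < 0))))).map
        (fun s2 => (s1, s2))) := by
  have hf : (fun (shifts : List (Int × Int)) (s1 : Int) =>
      (PySem.List.pyRange (-P) (P + 1) 1).foldl (fun shifts s2 =>
        if s1 = 0 ∧ s2 = 0 then shifts
        else if s1 < 0 ∨ (s1 = 0 ∧ s2 < 0) then shifts
        else shifts ++ [(s1, s2)]) shifts)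
    = (fun shifts s1 => shifts ++ ((PySem.List.pyRange (-P) (P + 1) 1).filter
        (fun s2 => decide (¬(s1 = 0 ∧ s2 = 0) ∧ ¬(s1 < 0 ∨ (s1 = 0 ∧ s2 < 0))))).map
        (fun s2 => (s1, s2))) := by
    funext shifts s1
    rw [show (fun (acc : List (Int × Int)) (s2 : Int) =>
          if s1 = 0 ∧ s2 = 0 then acc
          else if s1 < 0 ∨ (s1 = 0 ∧ s2 < 0) then acc
          else acc ++ [(s1, s2)])
        = (fun acc s2 =>
          if (¬(s1 = 0 ∧ s2 = 0) ∧ ¬(s1 < 0 ∨ (s1 = 0 ∧ s2 < 0))) then acc ++ [(s1, s2)]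
          else acc) from funext fun acc => funext fun s2 => pv_step_eq s1 s2 acc]
    exact PySem.List.foldl_append_ite _ _ _ _
  rw [hf, PySem.List.foldl_append_eq_flatMap, List.nil_append]

-- A's loop produces exactly the half-plane list (for P ≥ 0)
theorem pvA_half (P : Int) (hP : 0 ≤ P) :
    (PySem.List.pyRange (-P) (P + 1) 1).foldl (fun shifts s1 =>
      (PySem.List.pyRange (-P) (P + 1) 1).foldl (fun shifts s2 =>
        if s1 = 0 ∧ s2 = 0 then shifts
        else if s1 < 0 ∨ (s1 = 0 ∧ s2 < 0) then shifts
        else shifts ++ [(s1, s2)]) shifts) []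
  = pvHalf P := by
  rw [pvA_flatMap]
  unfold pvHalf
  have hsplit : PySem.List.pyRange (-P) (P + 1) 1
      = (PySem.List.pyRange (-P) 0 1 ++ PySem.List.pyRange 0 1 1) ++ PySem.List.pyRange 1 (P + 1) 1 := by
    rw [← PySem.List.pyRange_one_append (-P) 0 1 (by omega) (by omega),
        ← PySem.List.pyRange_one_append (-P) 1 (P + 1) (by omega) (by omega)]
  have h01 : PySem.List.pyRange 0 1 1 = [0] := rfl
  have key : ∀ (f : Int → List (Int × Int)), (∀ s1 ∈ PySem.List.pyRange (-P) 0 1, f s1 = []) →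
      List.flatMap f (PySem.List.pyRange (-P) (P + 1) 1)
        = f 0 ++ List.flatMap f (PySem.List.pyRange 1 (P + 1) 1) := by
    intro f hf
    rw [hsplit, h01]
    simp only [List.flatMap_append, List.flatMap_cons, List.flatMap_nil, List.append_nil]
    rw [List.flatMap_eq_nil_iff.mpr hf, List.nil_append]
  rw [key _ (fun s1 hs1 => by
    have hlt : s1 < 0 := (PySem.List.mem_pyRange_one.mp hs1).2
    have hfil : (PySem.List.pyRange (-P) (P + 1) 1).filter
        (fun s2 => decide (¬(s1 = 0 ∧ s2 = 0) ∧ ¬(s1 < 0 ∨ (s1 = 0 ∧ s2 < 0)))) = [] := by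
      refine List.filter_eq_nil_iff.mpr (fun s2 _ => ?_)
      simp only [decide_eq_true_eq]
      rintro ⟨-, h2⟩
      exact h2 (Or.inl hlt)
    rw [hfil]; rfl)]
  have h_zero : (PySem.List.pyRange (-P) (P + 1) 1).filter
      (fun s2 => decide (¬((0:Int) = 0 ∧ s2 = 0) ∧ ¬((0:Int) < 0 ∨ ((0:Int) = 0 ∧ s2 < 0))))
      = PySem.List.pyRange 1 (P + 1) 1 := by
    rw [PySem.List.pyRange_one_append (-P) 1 (P + 1) (by omega) (by omega), List.filter_append]
    have hl : (PySem.List.pyRange (-P) 1 1).filter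
        (fun s2 => decide (¬((0:Int) = 0 ∧ s2 = 0) ∧ ¬((0:Int) < 0 ∨ ((0:Int) = 0 ∧ s2 < 0)))) = [] := by
      refine List.filter_eq_nil_iff.mpr (fun s2 hs2 => ?_)
      have := PySem.List.mem_pyRange_one.mp hs2
      simp only [decide_eq_true_eq]
      rintro ⟨h1, h2⟩
      have hs0 : s2 ≠ 0 := fun h => h1 ⟨trivial, h⟩
      have hsneg : ¬ s2 < 0 := fun h => h2 (Or.inr ⟨trivial, h⟩)
      omega
    have hr : (PySem.List.pyRange 1 (P + 1) 1).filter
        (fun s2 => decide (¬((0:Int) = 0 ∧ s2 = 0) ∧ ¬((0:Int) < 0 ∨ ((0:Int) = 0 ∧ s2 < 0))))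
        = PySem.List.pyRange 1 (P + 1) 1 := by
      refine List.filter_eq_self.mpr (fun s2 hs2 => ?_)
      have := PySem.List.mem_pyRange_one.mp hs2
      simp only [decide_eq_true_eq]
      constructor
      · rintro ⟨-, h⟩; omega
      · rintro (h | ⟨-, h⟩) <;> omega
    rw [hl, hr, List.nil_append]
  have h_pos : (PySem.List.pyRange 1 (P + 1) 1).flatMap (fun s1 =>
      ((PySem.List.pyRange (-P) (P + 1) 1).filter
        (fun s2 => decide (¬(s1 = 0 ∧ s2 = 0) ∧ ¬(s1 < 0 ∨ (s1 = 0 ∧ s2 < 0))))).map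
        (fun s2 => (s1, s2)))
      = (PySem.List.pyRange 1 (P + 1) 1).flatMap (fun s1 =>
          (PySem.List.pyRange (-P) (P + 1) 1).map (fun s2 => (s1, s2))) := by
    refine List.flatMap_congr (fun s1 hs1 => ?_)
    have h1 : 1 ≤ s1 := (PySem.List.mem_pyRange_one.mp hs1).1
    have hfil : (PySem.List.pyRange (-P) (P + 1) 1).filter
        (fun s2 => decide (¬(s1 = 0 ∧ s2 = 0) ∧ ¬(s1 < 0 ∨ (s1 = 0 ∧ s2 < 0))))
        = PySem.List.pyRange (-P) (P + 1) 1 := by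
      refine List.filter_eq_self.mpr (fun s2 _ => ?_)
      simp only [decide_eq_true_eq]
      constructor
      · rintro ⟨h, -⟩; omega
      · rintro (h | ⟨h, -⟩) <;> omega
    rw [hfil]
  rw [h_zero, h_pos]

-- decoding a consecutive block of cell indices inside row r gives that row's (s1, s2) pairs
theorem pv_decode_row (P W r lo hi : Int) (hW : W = 2 * P + 1) (hP : 0 ≤ P)
    (hlo : 0 ≤ lo) (hhi : hi ≤ W) :
    (PySem.List.pyRange (r * W + lo) (r * W + hi) 1).map
      (fun m => (PySem.Int.floordiv m W - P, PySem.Int.mod m W - P))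
    = (PySem.List.pyRange (lo - P) (hi - P) 1).map (fun s2 => (r - P, s2)) := by
  rw [PySem.List.pyRange_one, PySem.List.pyRange_one, List.map_map, List.map_map]
  have hlen : (r * W + hi - (r * W + lo)).toNat = (hi - P - (lo - P)).toNat := by omega
  rw [hlen]
  refine List.map_congr_left (fun kk hk => ?_)
  have hk' : (kk : Int) < hi - lo := by
    have := List.mem_range.mp hk; omega
  have hk0 : (0 : Int) ≤ (kk : Int) := Int.natCast_nonneg kk
  have hWpos : 0 < W := by omega
  have hdiv : PySem.Int.floordiv (r * W + lo + kk) W = r := by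
    rw [PySem.Int.floordiv_eq_iff_of_pos hWpos]
    have h1 : (r + 1) * W = r * W + W := by ring
    constructor
    · linarith
    · linarith
  have hmod : PySem.Int.mod (r * W + lo + kk) W = lo + kk := by
    have := PySem.Int.floordiv_mul_add_mod (r * W + lo + kk) W
    rw [hdiv] at this
    linarith
  simp only [Function.comp]
  rw [hdiv, hmod]
  rw [show lo + (kk : Int) - P = lo - P + (kk : Int) by ring]

-- a block of whole rows decodes row by row
theorem pv_rows (W : Int) (hW : 0 < W) (f : Int → (Int × Int)) (n : Nat) :
    ∀ (u : Int),
    (PySem.List.pyRange (u * W) ((u + (n : Int)) * W) 1).map f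
    = (PySem.List.pyRange u (u + (n : Int)) 1).flatMap
        (fun r => (PySem.List.pyRange (r * W) ((r + 1) * W) 1).map f) := by
  induction n with
  | zero =>
    intro u
    simp only [Int.natCast_zero, add_zero]
    rw [PySem.List.pyRange_one_eq_nil (le_refl (u * W)),
        PySem.List.pyRange_one_eq_nil (le_refl u)]
    rfl
  | succ n ih =>
    intro u
    have h1 : u * W ≤ (u + 1) * W :=
      mul_le_mul_of_nonneg_right (by omega) hW.le
    have h2 : (u + 1) * W ≤ (u + ((n : Int) + 1)) * W :=
      mul_le_mul_of_nonneg_right (by omega) hW.le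
    have hc : (u + ((n + 1 : Nat) : Int)) = (u + 1) + (n : Int) := by push_cast; ring
    rw [hc]
    have h2' : (u + 1) * W ≤ ((u + 1) + (n : Int)) * W := by
      have : (u + ((n : Int) + 1)) = (u + 1) + (n : Int) := by ring
      rw [this] at h2; exact h2
    rw [PySem.List.pyRange_one_append (u * W) ((u + 1) * W) (((u + 1) + (n : Int)) * W) h1 h2',
        List.map_append,
        PySem.List.pyRange_one_cons (show u < (u + 1) + (n : Int) by omega),
        List.flatMap_cons, ih (u + 1)]

-- shifted range = mapped range
theorem pv_shift (a b c : Int) :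
    PySem.List.pyRange (a + c) (b + c) 1 = (PySem.List.pyRange a b 1).map (· + c) := by
  rw [PySem.List.pyRange_one, PySem.List.pyRange_one, List.map_map]
  have hlen : (b + c - (a + c)).toNat = (b - a).toNat := by omega
  rw [hlen]
  refine List.map_congr_left (fun kk _ => ?_)
  simp only [Function.comp]
  ring

-- B's index decoding produces exactly the half-plane list (for P ≥ 0)
theorem pvB_half (k : Int) (hP : 0 ≤ PySem.Int.floordiv k 2) :
    generate_shifts_py_alt k = pvHalf (PySem.Int.floordiv k 2) := by
  unfold generate_shifts_py_alt pvHalf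
  dsimp only
  set P := PySem.Int.floordiv k 2 with hPdef
  have hmax : max P 0 = P := by omega
  rw [hmax]
  set W := 2 * P + 1 with hWdef
  have hWpos : 0 < W := by omega
  have hmid : PySem.Int.floordiv (W * W) 2 = P * W + P := by
    refine (PySem.Int.floordiv_eq_iff_of_pos (by norm_num)).mpr ⟨by nlinarith, by nlinarith⟩
  rw [hmid]
  -- split the index range at the end of row P (= index (P+1)*W)
  have e0 : P * W + P + 1 = P * W + (P + 1) := by ring
  have e1 : (P + 1) * W = P * W + W := by ring
  have hle1 : P * W + (P + 1) ≤ P * W + W := by omega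
  have hle2 : P * W + W ≤ W * W := by nlinarith
  rw [e0, PySem.List.pyRange_one_append (P * W + (P + 1)) (P * W + W) (W * W) hle1 hle2,
      List.map_append]
  congr 1
  · -- the tail of row P: s1 = 0, s2 = 1..P
    rw [pv_decode_row P W P (P + 1) W rfl hP (by omega) (le_refl W)]
    have : P + 1 - P = 1 := by ring
    rw [this]
    have : W - P = P + 1 := by omega
    rw [this]
    have : P - P = 0 := by ring
    rw [this]
  · -- rows P+1 .. 2P: whole rows
    have e2 : P * W + W = (P + 1) * W := by ring
    have e3 : W * W = ((P + 1) + (P.toNat : Int)) * W := by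
      rw [Int.toNat_of_nonneg hP]; ring
    rw [e2, e3, pv_rows W hWpos _ P.toNat (P + 1)]
    have e4 : (P + 1) + (P.toNat : Int) = (P + 1) + P := by rw [Int.toNat_of_nonneg hP]
    rw [e4]
    have e5 : PySem.List.pyRange (P + 1) ((P + 1) + P) 1
        = (PySem.List.pyRange 1 (P + 1) 1).map (· + P) := by
      have h := pv_shift 1 (P + 1) P
      rw [show (1 : Int) + P = P + 1 by ring] at h
      exact h
    rw [e5, List.flatMap_map]
    refine List.flatMap_congr (fun s1 hs1 => ?_)
    have e6 : (s1 + P) * W + 0 = (s1 + P) * W := by ring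
    have := pv_decode_row P W (s1 + P) 0 W rfl hP (le_refl 0) (le_refl W)
    rw [e6] at this
    rw [show ((s1 + P) + 1) * W = (s1 + P) * W + W by ring, this]
    have : (0 : Int) - P = -P := by ring
    rw [this]
    have : W - P = P + 1 := by omega
    rw [this]
    have : s1 + P - P = s1 := by ring
    rw [this]

-- ===== VERDICT (by name: the statement is the Claim_ definition above) =====
theorem generate_shifts_py_spec : Claim_equal_generate_shifts_py := by
  intro k _
  unfold Spec_generate_shifts_py
  by_cases hP : 0 ≤ PySem.Int.floordiv k 2
  · unfold generate_shifts_py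
    dsimp only
    rw [pvA_half (PySem.Int.floordiv k 2) hP, pvB_half k hP]
  · -- P < 0: both sides are empty
    unfold generate_shifts_py generate_shifts_py_alt
    dsimp only
    have hmax : max (PySem.Int.floordiv k 2) 0 = 0 := by omega
    rw [hmax]
    have hA : PySem.List.pyRange (-(PySem.Int.floordiv k 2)) (PySem.Int.floordiv k 2 + 1) 1 = [] :=
      PySem.List.pyRange_one_eq_nil (by omega)
    rw [hA]
    rfl
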